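-- pv_equiv track=rewrite | github.com/lkjsxc/kjxlkj | tools/todo_prune.py | prune_checked_lines
-- ===== SOURCE A (Python) =====
-- def prune_checked_lines(lines: list[str]) -> list[str]:
--     kept: list[str] = []
--     previous_blank = False
--
--     for line in lines:
--         stripped = line.lstrip()
--         if stripped.startswith("- [x]") or stripped.startswith("- [X]"):
--             continue
--
--         is_blank = stripped == "" or stripped == "\n"
--         if is_blank:
--             if previous_blank:
--                 continue
--             previous_blank = True
--             kept.append("\n")
--             continue
--
--         previous_blank = False
--         kept.append(line)
--
--     while kept and kept[-1] == "\n":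
--         kept.pop()
--     kept.append("\n")
--     return kept
-- ===== SOURCE B (Python) =====
-- def prune_checked_lines(lines: list[str]) -> list[str]:
--     filtered = [l for l in lines
--                 if not (l.lstrip().startswith("- [x]") or l.lstrip().startswith("- [X]"))]
--     out: list[str] = []
--     prev = -1
--     for i, line in enumerate(filtered):
--         if line.lstrip() == "":
--             continue
--         if i > prev + 1:
--             out.append("\n")
--         out.append(line)
--         prev = i
--     out.append("\n")
--     return out
-- ===== Notes on version B (the rewrite author's own statement) =====
-- stated objective: alternative
-- what changed: A emits a newline eagerly at each blank run and then trims trailing newlines with a pop loop; B never emits blanks at all: it enumerates the filtered list and, for each non-blank line, detects a preceding blank run by index arithmetic (i > prev+1) and prepends one newline, so no trailing-trim pass exists.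
import Mathlib
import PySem

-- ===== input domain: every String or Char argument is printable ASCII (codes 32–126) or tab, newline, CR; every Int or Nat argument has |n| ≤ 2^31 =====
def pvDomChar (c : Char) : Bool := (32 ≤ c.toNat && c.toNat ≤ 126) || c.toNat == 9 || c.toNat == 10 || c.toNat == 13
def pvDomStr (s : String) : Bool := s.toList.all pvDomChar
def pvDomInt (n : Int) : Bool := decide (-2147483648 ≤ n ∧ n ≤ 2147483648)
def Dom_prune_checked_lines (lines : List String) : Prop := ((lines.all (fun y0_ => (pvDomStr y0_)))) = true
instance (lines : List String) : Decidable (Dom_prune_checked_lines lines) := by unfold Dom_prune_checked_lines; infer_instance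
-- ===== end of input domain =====

-- B replaces A's eager blank emission + trailing pop-trim by a single enumerate pass over the
-- filtered list that inserts a newline before a non-blank line iff index arithmetic (i > prev+1)
-- shows a blank gap; objective: alternative decomposition, no trimming pass.

-- ===== PORT A =====
-- one step of A's for-loop: state = (kept, previous_blank)
def pruneStepA (st : List String × Bool) (line : String) : List String × Bool :=
  let stripped := PySem.Str.lstrip line
  if PySem.Str.startswith stripped "- [x]" || PySem.Str.startswith stripped "- [X]" then st
  else if stripped == "" || stripped == "\n" then
    (if st.2 then st else (st.1 ++ ["\n"], true))
  else (st.1 ++ [line], false)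

-- A's trailing 'while kept and kept[-1] == "\n": kept.pop()', run on the reversed list
def trimPopA : List String → List String
  | [] => []
  | x :: xs => if x == "\n" then trimPopA xs else x :: xs

def prune_checked_lines (lines : List String) : List String :=
  let kept := (lines.foldl pruneStepA ([], false)).1
  (trimPopA kept.reverse).reverse ++ ["\n"]

-- ===== PORT B =====
-- one step of B's for-loop over enumerate(filtered): state = (out, prev)
def pruneStepB (st : List String × Int) (p : Int × String) : List String × Int :=
  if PySem.Str.lstrip p.2 == "" then st
  else ((if p.1 > st.2 + 1 then st.1 ++ ["\n", p.2] else st.1 ++ [p.2]), p.1)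

def prune_checked_lines_alt (lines : List String) : List String :=
  let filtered := lines.filter (fun l =>
    !(PySem.Str.startswith (PySem.Str.lstrip l) "- [x]" ||
      PySem.Str.startswith (PySem.Str.lstrip l) "- [X]"))
  ((PySem.List.enumerate filtered).foldl pruneStepB ([], -1)).1 ++ ["\n"]

-- ===== PRECONDITION & SPEC =====
def Spec_prune_checked_lines (lines : List String) (out : List String) : Prop := out = prune_checked_lines_alt lines
instance (lines : List String) (out : List String) : Decidable (Spec_prune_checked_lines lines out) := by unfold Spec_prune_checked_lines; infer_instance

-- ===== CLAIM (what is proved, stated in full; the proofs are below) =====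
def Claim_equal_prune_checked_lines : Prop := ∀ (lines : List String), Dom_prune_checked_lines lines → Spec_prune_checked_lines lines (prune_checked_lines lines)

-- ===== LEMMAS AND PROOFS =====

def pvCheckedP (l : String) : Bool :=
  PySem.Str.startswith (PySem.Str.lstrip l) "- [x]" ||
  PySem.Str.startswith (PySem.Str.lstrip l) "- [X]"

def pvBlankP (l : String) : Bool := PySem.Str.lstrip l == ""

-- A's loop, written as structural recursion producing the lines it appends
def goA : Bool → List String → List String
  | _, [] => []
  | pb, l :: ls =>
    if pvCheckedP l then goA pb ls
    else if PySem.Str.lstrip l == "" || PySem.Str.lstrip l == "\n" then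
      (if pb then goA true ls else "\n" :: goA true ls)
    else l :: goA false ls

-- reference form of B's output (gap flag instead of index arithmetic)
def gapRun : Bool → List String → List String
  | _, [] => []
  | g, l :: ls =>
    if pvBlankP l then gapRun true ls
    else (if g then ["\n", l] else [l]) ++ gapRun false ls

-- trim trailing newlines, as A's pop loop does
def rtrim (xs : List String) : List String := (trimPopA xs.reverse).reverse

lemma lstrip_chars_ne (cs : List Char) : PySem.Chars.lstrip cs ≠ ['\n'] := by
  induction cs with
  | nil => simp [PySem.Chars.lstrip]
  | cons c cs ih =>
    simp only [PySem.Chars.lstrip, List.dropWhile_cons] at ih ⊢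
    split_ifs with h
    · exact ih
    · intro hEq
      apply h
      injection hEq with h1 _
      subst h1
      decide

-- lstrip never returns "\n" (its head would still be whitespace)
lemma lstrip_ne_nl (l : String) : (PySem.Str.lstrip l == ("\n" : String)) = false := by
  rw [beq_eq_false_iff_ne]
  intro h
  have h' := congrArg String.toList h
  simp at h'
  exact lstrip_chars_ne _ h'

lemma blankA_eq_blankB (l : String) :
    (PySem.Str.lstrip l == "" || PySem.Str.lstrip l == ("\n" : String)) = pvBlankP l := by
  simp [pvBlankP, lstrip_ne_nl]

lemma foldA (ls : List String) : ∀ (acc : List String) (pb : Bool),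
    (List.foldl pruneStepA (acc, pb) ls).1 = acc ++ goA pb ls := by
  induction ls with
  | nil => intro acc pb; simp [goA]
  | cons l ls ih =>
    intro acc pb
    simp only [List.foldl_cons]
    by_cases hc : (PySem.Str.startswith (PySem.Str.lstrip l) "- [x]" ||
        PySem.Str.startswith (PySem.Str.lstrip l) "- [X]") = true
    · simp at hc
      simp [pruneStepA, goA, pvCheckedP, hc, ih]
    · simp at hc
      by_cases hb : (PySem.Str.lstrip l == "" || PySem.Str.lstrip l == ("\n" : String)) = true
      · simp at hb
        cases pb with
        | true => simp [pruneStepA, goA, pvCheckedP, hc, hb, ih]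
        | false => simp [pruneStepA, goA, pvCheckedP, hc, hb, ih]
      · simp at hb
        simp [pruneStepA, goA, pvCheckedP, hc, hb, ih]

-- a non-blank line is not "\n"
lemma nonblank_ne_nl (l : String) (h : pvBlankP l = false) : (l == ("\n" : String)) = false := by
  rw [beq_eq_false_iff_ne]
  intro hEq
  subst hEq
  simp [pvBlankP, PySem.Str.lstrip, PySem.Chars.lstrip] at h
  revert h
  decide

lemma trimPopA_eq_dropWhile (ys : List String) :
    trimPopA ys = ys.dropWhile (fun x => x == ("\n" : String)) := by
  induction ys with
  | nil => rfl
  | cons y ys ih =>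
    by_cases h : (y == ("\n" : String)) = true
    · simp [trimPopA, h, ih]
    · simp [trimPopA, h]

lemma rtrim_cons (a : String) (xs : List String) :
    rtrim (a :: xs) = if (a == ("\n" : String)) && (rtrim xs).isEmpty then [] else a :: rtrim xs := by
  unfold rtrim
  simp only [List.reverse_cons]
  rw [trimPopA_eq_dropWhile, trimPopA_eq_dropWhile, List.dropWhile_append]
  by_cases he : (List.dropWhile (fun x => x == ("\n" : String)) xs.reverse).isEmpty
  · have he' : List.dropWhile (fun x => x == ("\n" : String)) xs.reverse = [] := by
      simpa [List.isEmpty_iff] using he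
    by_cases ha : (a == ("\n" : String)) = true
    · simp [he', ha]
    · simp [he', ha]
  · simp [he]

lemma rtrim_goA (ls : List String) :
    rtrim (goA false ls) = gapRun false (ls.filter (fun l => !pvCheckedP l)) ∧
    rtrim ("\n" :: goA true ls) = gapRun true (ls.filter (fun l => !pvCheckedP l)) := by
  induction ls with
  | nil =>
    constructor <;> simp [goA, gapRun, rtrim, trimPopA]
  | cons l ls ih =>
    by_cases hc : pvCheckedP l = true
    · simpa [goA, hc, List.filter_cons] using ih
    · have hc0 : pvCheckedP l = false := eq_false_of_ne_true hc
      by_cases hb : pvBlankP l = true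
      · have hb' : (PySem.Str.lstrip l == "" || PySem.Str.lstrip l == ("\n" : String)) = true := by
          rw [blankA_eq_blankB]; exact hb
        refine ⟨?_, ?_⟩
        · rw [show goA false (l :: ls) = "\n" :: goA true ls from by simp [goA, hc0, hb']]
          rw [show (l :: ls).filter (fun l => !pvCheckedP l) = l :: ls.filter (fun l => !pvCheckedP l) from by simp [hc0]]
          rw [show gapRun false (l :: ls.filter (fun l => !pvCheckedP l)) = gapRun true (ls.filter (fun l => !pvCheckedP l)) from by simp [gapRun, hb]]
          exact ih.2
        · rw [show goA true (l :: ls) = goA true ls from by simp [goA, hc0, hb']]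
          rw [show (l :: ls).filter (fun l => !pvCheckedP l) = l :: ls.filter (fun l => !pvCheckedP l) from by simp [hc0]]
          rw [show gapRun true (l :: ls.filter (fun l => !pvCheckedP l)) = gapRun true (ls.filter (fun l => !pvCheckedP l)) from by simp [gapRun, hb]]
          exact ih.2
      · have hb1 : pvBlankP l = false := eq_false_of_ne_true hb
        have hb' : (PySem.Str.lstrip l == "" || PySem.Str.lstrip l == ("\n" : String)) = false := by
          rw [blankA_eq_blankB]; exact hb1
        have hnl := nonblank_ne_nl l hb1
        have hfil : (l :: ls).filter (fun l => !pvCheckedP l) = l :: ls.filter (fun l => !pvCheckedP l) := by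
          simp [hc0]
        refine ⟨?_, ?_⟩
        · rw [show goA false (l :: ls) = l :: goA false ls from by simp [goA, hc0, hb'], rtrim_cons]
          rw [hfil, show gapRun false (l :: ls.filter (fun l => !pvCheckedP l)) = l :: gapRun false (ls.filter (fun l => !pvCheckedP l)) from by simp [gapRun, hb1]]
          simp [hnl, ih.1]
        · rw [show goA true (l :: ls) = l :: goA false ls from by simp [goA, hc0, hb'], rtrim_cons, rtrim_cons]
          rw [hfil, show gapRun true (l :: ls.filter (fun l => !pvCheckedP l)) = "\n" :: l :: gapRun false (ls.filter (fun l => !pvCheckedP l)) from by simp [gapRun, hb1]]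
          simp [hnl, ih.1]

lemma foldB (fs : List String) : ∀ (k prev : Int) (acc : List String), prev ≤ k - 1 →
    (List.foldl pruneStepB (acc, prev) (PySem.List.enumerate fs k)).1
      = acc ++ gapRun (decide (prev < k - 1)) fs := by
  induction fs with
  | nil => intro k prev acc _; simp [PySem.List.enumerate_nil, gapRun]
  | cons l ls ih =>
    intro k prev acc hle
    rw [PySem.List.enumerate_cons, List.foldl_cons]
    by_cases hb : pvBlankP l = true
    · have h0 : (PySem.Str.lstrip l == "") = true := hb
      have hstep : pruneStepB (acc, prev) (k, l) = (acc, prev) := by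
        simp [pruneStepB, h0]
      rw [hstep, ih (k + 1) prev acc (by omega)]
      have h1 : decide (prev < k + 1 - 1) = true := decide_eq_true (by omega)
      have h2 : gapRun (decide (prev < k - 1)) (l :: ls) = gapRun true ls := by
        cases hdk : decide (prev < k - 1) <;> simp [gapRun, hb]
      rw [h1, h2]
    · have hb1 : pvBlankP l = false := eq_false_of_ne_true hb
      have h0 : (PySem.Str.lstrip l == "") = false := hb1
      by_cases hg : prev < k - 1
      · have hk : k > prev + 1 := by omega
        have hstep : pruneStepB (acc, prev) (k, l) = (acc ++ ["\n", l], k) := by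
          simp [pruneStepB, h0, hk]
        rw [hstep, ih (k + 1) k _ (by omega)]
        have h1 : decide (prev < k - 1) = true := decide_eq_true hg
        have h2 : decide (k < k + 1 - 1) = false := decide_eq_false (by omega)
        rw [h1, h2]
        simp [gapRun, hb1]
      · have hk : ¬ (k > prev + 1) := by omega
        have hstep : pruneStepB (acc, prev) (k, l) = (acc ++ [l], k) := by
          simp [pruneStepB, h0, hk]
        rw [hstep, ih (k + 1) k _ (by omega)]
        have h1 : decide (prev < k - 1) = false := decide_eq_false hg
        have h2 : decide (k < k + 1 - 1) = false := decide_eq_false (by omega)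
        rw [h1, h2]
        simp [gapRun, hb1]

-- ===== VERDICT (by name: the statement is the Claim_ definition above) =====
theorem prune_checked_lines_spec : Claim_equal_prune_checked_lines := by
  intro lines _
  show (trimPopA ((lines.foldl pruneStepA ([], false)).1).reverse).reverse ++ ["\n"] =
      ((PySem.List.enumerate (lines.filter (fun l =>
        !(PySem.Str.startswith (PySem.Str.lstrip l) "- [x]" ||
          PySem.Str.startswith (PySem.Str.lstrip l) "- [X]")))).foldl pruneStepB ([], -1)).1 ++ ["\n"]
  rw [foldA lines [] false, List.nil_append,
      foldB _ 0 (-1) [] (by omega)]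
  have : decide ((-1 : Int) < 0 - 1) = false := by simp
  rw [this, List.nil_append]
  have := (rtrim_goA lines).1
  unfold rtrim at this
  rw [this]
  simp only [pvCheckedP]
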